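-- pv_equiv track=rewrite | github.com/skyrim4ev3r/leetcode_solutions | algorithms/2_medium/M/03818_minimum_prefix_removal_to_make-array_strictly_increasing/solution.py | minimumPrefixLength
-- ===== SOURCE A (Python) =====
-- from typing import List
--
-- def minimumPrefixLength(nums: List[int]) -> int:
--     n = len(nums)
--
--     if n <= 1:
--         return 0
--
--     index = n - 1
--
--     while index > 0 and nums[index] > nums[index - 1]:
--         index -= 1
--
--     return index
-- ===== SOURCE B (Python) =====
-- def minimumPrefixLength(nums):
--     ans = 0
--     for i in range(1, len(nums)):
--         if nums[i] <= nums[i - 1]: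
--             ans = i
--     return ans
-- ===== Notes on version B (the rewrite author's own statement) =====
-- stated objective: alternative
-- what changed: Replaces A's backward while-loop that stops at the first non-increasing step seen from the end with a forward full scan that keeps the index of the last violation in an accumulator.
import Mathlib
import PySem

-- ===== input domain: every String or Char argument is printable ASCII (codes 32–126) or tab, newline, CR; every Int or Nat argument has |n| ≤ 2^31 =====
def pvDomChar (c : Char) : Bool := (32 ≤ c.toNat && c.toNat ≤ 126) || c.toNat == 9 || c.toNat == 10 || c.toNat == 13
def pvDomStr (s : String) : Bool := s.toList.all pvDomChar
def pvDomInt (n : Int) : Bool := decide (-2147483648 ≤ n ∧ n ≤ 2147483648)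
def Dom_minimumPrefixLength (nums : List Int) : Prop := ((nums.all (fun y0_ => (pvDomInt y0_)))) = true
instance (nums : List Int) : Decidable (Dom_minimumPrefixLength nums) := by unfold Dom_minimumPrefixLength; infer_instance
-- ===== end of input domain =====

-- B replaces A's backward while-loop (stop at the first non-increasing step from the end)
-- with a forward full scan that keeps the index of the last violation; same O(n) cost.

-- ===== PORT A =====
-- A's while loop: index counts down from n-1 while nums[index] > nums[index-1].
-- Indices are always in range here, so pyGetD with default 0 is exact for nums[index].
def minimumPrefixLength_go (nums : List Int) : Nat → Nat
  | 0 => 0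
  | k + 1 =>
      if PySem.List.pyGetD nums ((k : Int) + 1) 0 > PySem.List.pyGetD nums (k : Int) 0 then
        minimumPrefixLength_go nums k
      else k + 1

def minimumPrefixLength (nums : List Int) : Int :=
  let n := nums.length
  if (n : Int) ≤ 1 then 0
  else (minimumPrefixLength_go nums (n - 1) : Int)

-- ===== PORT B =====
-- forward scan: ans = index of the last i with nums[i] <= nums[i-1], else 0
def minimumPrefixLength_alt (nums : List Int) : Int :=
  (PySem.List.pyRange 1 nums.length 1).foldl
    (fun ans i =>
      if PySem.List.pyGetD nums i 0 ≤ PySem.List.pyGetD nums (i - 1) 0 then i else ans)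
    0

-- ===== PRECONDITION & SPEC =====
def Spec_minimumPrefixLength (nums : List Int) (out : Int) : Prop := out = minimumPrefixLength_alt nums
instance (nums : List Int) (out : Int) : Decidable (Spec_minimumPrefixLength nums out) := by unfold Spec_minimumPrefixLength; infer_instance

-- ===== CLAIM (what is proved, stated in full; the proofs are below) =====
def Claim_equal_minimumPrefixLength : Prop := ∀ (nums : List Int), Dom_minimumPrefixLength nums → Spec_minimumPrefixLength nums (minimumPrefixLength nums)

-- ===== LEMMAS AND PROOFS =====

-- B's fold over range(1, m+1) computes the same value as A's countdown loop started at m.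
theorem fold_eq_go (nums : List Int) (m : Nat) :
    (PySem.List.pyRange 1 ((m : Int) + 1) 1).foldl
      (fun ans i =>
        if PySem.List.pyGetD nums i 0 ≤ PySem.List.pyGetD nums (i - 1) 0 then i else ans)
      0 = (minimumPrefixLength_go nums m : Int) := by
  induction m with
  | zero =>
      rw [PySem.List.pyRange_one_eq_nil (by norm_num)]
      simp [minimumPrefixLength_go]
  | succ k ih =>
      rw [show ((k + 1 : Nat) : Int) + 1 = (((k : Int) + 1) + 1) by push_cast; ring,
        PySem.List.pyRange_one_succ_right (by omega), List.foldl_append]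
      simp only [List.foldl]
      rw [ih]
      simp only [minimumPrefixLength_go]
      have hsub : ((k : Int) + 1) - 1 = (k : Int) := by ring
      rw [hsub]
      by_cases h : PySem.List.pyGetD nums ((k : Int) + 1) 0 > PySem.List.pyGetD nums (k : Int) 0
      · rw [if_neg (by omega), if_pos h]
      · rw [if_pos (by omega), if_neg h]
        push_cast; ring

-- ===== VERDICT (by name: the statement is the Claim_ definition above) =====
theorem minimumPrefixLength_spec : Claim_equal_minimumPrefixLength := by
  intro nums _
  unfold Spec_minimumPrefixLength minimumPrefixLength minimumPrefixLength_alt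
  by_cases h : (nums.length : Int) ≤ 1
  · simp only [h, if_pos]
    rw [PySem.List.pyRange_one_eq_nil h]
    simp
  · simp only [h, if_neg, not_false_iff]
    have hlen : ((nums.length - 1 : Nat) : Int) + 1 = (nums.length : Int) := by omega
    rw [← hlen, fold_eq_go]
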